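-- pv_equiv track=rewrite | github.com/S-Christensen/cartographersStudy | scoringCards.py | sentinelWood
-- ===== SOURCE A (Python) =====
-- def sentinelWood(grid):
--     count = 0
--     rows, cols = len(grid), len(grid[0])
--
--     for r in range(rows):
--         for c in range(cols):
--             if grid[r][c] == "forest":
--                 if r == 0 or r == rows - 1 or c == 0 or c == cols - 1:
--                     count += 1
--
--     return count
-- ===== SOURCE B (Python) =====
-- def sentinelWood(grid):
--     rows, cols = len(grid), len(grid[0])
--     count = grid[0].count("forest")
--     if rows > 1:
--         count += grid[-1][:cols].count("forest")
--         for row in grid[1:-1]: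
--             if cols > 0 and row[0] == "forest":
--                 count += 1
--             if cols > 1 and row[cols - 1] == "forest":
--                 count += 1
--     return count
-- ===== Notes on version B (the rewrite author's own statement) =====
-- stated objective: faster
-- what changed: instead of scanning every cell of the grid and testing whether its coordinates lie on the border, B counts only border cells: it counts 'forest' in the first and last rows and checks just the two edge cells of each middle row.
import Mathlib
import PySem

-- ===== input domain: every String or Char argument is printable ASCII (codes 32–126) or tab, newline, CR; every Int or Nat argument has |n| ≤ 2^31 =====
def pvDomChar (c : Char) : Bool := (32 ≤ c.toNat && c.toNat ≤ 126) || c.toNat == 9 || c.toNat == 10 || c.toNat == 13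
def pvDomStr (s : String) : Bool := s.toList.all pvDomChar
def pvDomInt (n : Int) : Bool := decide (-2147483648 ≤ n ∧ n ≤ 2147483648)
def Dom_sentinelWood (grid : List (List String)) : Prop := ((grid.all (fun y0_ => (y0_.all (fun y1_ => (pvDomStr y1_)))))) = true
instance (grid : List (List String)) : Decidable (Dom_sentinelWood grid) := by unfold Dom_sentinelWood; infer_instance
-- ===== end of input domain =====

-- B counts only the border cells (first row, last row, the two edge cells of each middle
-- row) instead of scanning every cell and testing its coordinates; asymptotically faster.

-- ===== PORT A =====
def sentinelWood (grid : List (List String)) : Int :=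
  let rows : Int := grid.length
  let cols : Int := (PySem.List.pyGetD grid 0 []).length
  (PySem.List.pyRange 0 rows 1).foldl (fun count r =>
    (PySem.List.pyRange 0 cols 1).foldl (fun count c =>
      if PySem.List.pyGetD (PySem.List.pyGetD grid r []) c "" == "forest" then
        (if r == 0 || r == rows - 1 || c == 0 || c == cols - 1 then count + 1 else count)
      else count) count) 0

-- ===== PORT B =====
def sentinelWood_alt (grid : List (List String)) : Int :=
  let rows : Int := grid.length
  let cols : Int := (PySem.List.pyGetD grid 0 []).length
  let count : Int := ((PySem.List.pyGetD grid 0 []).count "forest" : Nat)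
  if rows > 1 then
    let count := count + (((PySem.List.slice (PySem.List.pyGetD grid (-1) []) none (some cols)).count "forest" : Nat) : Int)
    (PySem.List.slice grid (some 1) (some (-1))).foldl (fun count row =>
      let count := if 0 < cols ∧ PySem.List.pyGetD row 0 "" == "forest" then count + 1 else count
      if 1 < cols ∧ PySem.List.pyGetD row (cols - 1) "" == "forest" then count + 1 else count) count
  else count

-- ===== PRECONDITION & SPEC =====
-- Pre_ excludes exactly the inputs on which A raises: the empty grid (grid[0] IndexError)
-- and ragged grids with a row shorter than the first row (grid[r][c] IndexError).
def Pre_sentinelWood (grid : List (List String)) : Prop :=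
  grid ≠ [] ∧ ∀ row ∈ grid, (grid.headD []).length ≤ row.length
instance (grid : List (List String)) : Decidable (Pre_sentinelWood grid) := by
  unfold Pre_sentinelWood; infer_instance
def pvWitness_sentinelWood : List (List String) :=
  [["forest", "x"], ["y", "forest"], ["forest", "forest"]]
def Spec_sentinelWood (grid : List (List String)) (out : Int) : Prop := out = sentinelWood_alt grid
instance (grid : List (List String)) (out : Int) : Decidable (Spec_sentinelWood grid out) := by unfold Spec_sentinelWood; infer_instance

-- ===== CLAIM (what is proved, stated in full; the proofs are below) =====
def Claim_equal_sentinelWood : Prop := ∀ (grid : List (List String)), Dom_sentinelWood grid → Pre_sentinelWood grid → Spec_sentinelWood grid (sentinelWood grid)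


-- ===== LEMMAS AND PROOFS =====

-- the two edge-cell contributions of one middle row (count of borders in row r, 0<r<rows-1)
def edgeCnt (n : Nat) (row : List String) : Int :=
  (if 0 < (n:Int) ∧ PySem.List.pyGetD row 0 "" == "forest" then 1 else 0)
  + (if 1 < (n:Int) ∧ PySem.List.pyGetD row ((n:Int) - 1) "" == "forest" then 1 else 0)

-- inner column loop when the row test is already true (first / last row): full row count
theorem inner_full (row : List String) (n : Nat) (h : n ≤ row.length) (B : Int → Bool)
    (hB : ∀ c : Int, 0 ≤ c → c < (n:Int) → B c = true) (count : Int) :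
    (PySem.List.pyRange 0 (n:Int) 1).foldl
      (fun count c => if PySem.List.pyGetD row c "" == "forest" then
          (if B c then count + 1 else count) else count) count
    = count + (((row.take n).count "forest" : Nat) : Int) := by
  rw [PySem.List.foldl_congr_mem _ _
        (fun count c => if PySem.List.pyGetD (row.take n) c "" == "forest" then count + 1 else count)
        count ?_]
  · have hl : (row.take n).length = n := by simp [List.length_take, Nat.min_eq_left h]
    calc (PySem.List.pyRange 0 (n:Int) 1).foldl
          (fun count c => if PySem.List.pyGetD (row.take n) c "" == "forest" then count + 1 else count) count
        = (PySem.List.pyRange 0 ((row.take n).length : Int) 1).foldl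
            (fun count c => if PySem.List.pyGetD (row.take n) c "" == "forest" then count + 1 else count) count := by
          rw [hl]
      _ = (row.take n).foldl (fun count cell => if cell == "forest" then count + 1 else count) count :=
          PySem.List.foldl_pyRange_zero_pyGetD' (row.take n) ""
            (fun count cell => if cell == "forest" then count + 1 else count) count
      _ = count + (((row.take n).count "forest" : Nat) : Int) :=
          PySem.List.foldl_beq_add_one (row.take n) "forest" count
  · intro acc c hc
    rw [PySem.List.mem_pyRange_one] at hc
    obtain ⟨h0, h1⟩ := hc
    rw [hB c h0 h1]
    have h2 : c < (row.length : Int) := by omega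
    have h3 : c < ((row.take n).length : Int) := by
      simp [List.length_take, Nat.min_eq_left h]; omega
    have e1 := PySem.List.pyGetD_eq_getElem row "" h0 h2
    have e2 := PySem.List.pyGetD_eq_getElem (row.take n) "" h0 h3
    simp [e1, e2, List.getElem_take]

-- inner column loop for a middle row: only the two edge columns contribute
theorem inner_edge (row : List String) (n : Nat) (B : Int → Bool)
    (hB : ∀ c : Int, 0 ≤ c → c < (n:Int) → B c = (c == 0 || c == (n:Int) - 1)) (count : Int) :
    (PySem.List.pyRange 0 (n:Int) 1).foldl
      (fun count c => if PySem.List.pyGetD row c "" == "forest" then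
          (if B c then count + 1 else count) else count) count
    = count + edgeCnt n row := by
  match n with
  | 0 => simp [edgeCnt]
  | 1 =>
      have hr : PySem.List.pyRange 0 ((1:Nat):Int) 1 = [0] := by
        have := PySem.List.pyRange_one_singleton (a := 0); simpa using this
      rw [hr]
      have hB0 := hB 0 (by omega) (by omega)
      simp only [List.foldl_cons, List.foldl_nil, hB0, edgeCnt]
      norm_num
      split_ifs <;> simp_all
  | (m+2) =>
      have hsplit : PySem.List.pyRange 0 ((m+2:Nat):Int) 1
          = 0 :: (PySem.List.pyRange 1 (((m+2:Nat):Int) - 1) 1 ++ [((m+2:Nat):Int) - 1]) := by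
        rw [PySem.List.pyRange_one_cons (by push_cast; omega)]
        congr 1
        rw [show ((m+2:Nat):Int) = (((m+2:Nat):Int) - 1) + 1 by omega,
            PySem.List.pyRange_one_succ_right (by push_cast; omega)]
        norm_num
      have hmidfold : ∀ init : Int,
          (PySem.List.pyRange 1 (((m+2:Nat):Int) - 1) 1).foldl
            (fun count c => if PySem.List.pyGetD row c "" == "forest" then
              (if B c then count + 1 else count) else count) init = init := by
        intro init
        rw [PySem.List.foldl_congr_mem _ _ (fun acc _ => acc) init ?_]
        · exact PySem.List.foldl_ignore _ init
        · intro acc c hc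
          rw [PySem.List.mem_pyRange_one] at hc
          have hBc := hB c (by omega) (by push_cast at hc ⊢; omega)
          have hc0 : (c == (0:Int)) = false := by simp; omega
          have hc1 : (c == ((m+2:Nat):Int) - 1) = false := by simp; omega
          simp only [hBc, hc0, hc1, Bool.or_false]
          split <;> rfl
      rw [hsplit, List.foldl_cons, List.foldl_append, hmidfold]
      rw [hB 0 (by omega) (by push_cast; omega)]
      simp only [List.foldl_cons, List.foldl_nil]
      rw [hB (((m+2:Nat):Int) - 1) (by push_cast; omega) (by push_cast; omega)]
      have he1 : ((((m+2:Nat):Int) - 1) == (((m+2:Nat):Int) - 1)) = true := by simp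
      have he2 : ((((m+2:Nat):Int) - 1) == (0:Int)) = false := by simp; omega
      simp only [he1, he2, Bool.false_or, edgeCnt]
      norm_num
      have hp1 : (1:Int) < ((m+2:Nat):Int) := by push_cast; omega
      split_ifs <;> simp_all <;> omega

-- one middle-row step of B equals adding edgeCnt
theorem bstep_edge (n : Nat) (row : List String) (count : Int) :
    (if 1 < (n:Int) ∧ PySem.List.pyGetD row ((n:Int) - 1) "" == "forest" then
      (if 0 < (n:Int) ∧ PySem.List.pyGetD row 0 "" == "forest" then count + 1 else count) + 1
     else (if 0 < (n:Int) ∧ PySem.List.pyGetD row 0 "" == "forest" then count + 1 else count))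
    = count + edgeCnt n row := by
  simp only [edgeCnt]
  split_ifs <;> omega

theorem slice_one_neg_one {α : Type} (xs : List α) :
    PySem.List.slice xs (some 1) (some (-1)) = xs.tail.dropLast := by
  simp [PySem.List.slice, PySem.List.clampIdx]
  rcases xs with _ | ⟨a, t⟩
  · simp
  · simp [List.dropLast_eq_take]

-- ===== VERDICT (by name: the statement is the Claim_ definition above) =====
theorem sentinelWood_spec : Claim_equal_sentinelWood := by
  intro grid _ hpre
  unfold Spec_sentinelWood
  obtain ⟨hne, hlen⟩ := hpre
  match grid, hne with
  | g0 :: rest, _ =>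
  simp only [List.headD_cons] at hlen
  have hlen0 : ∀ row ∈ (g0 :: rest), g0.length ≤ row.length := hlen
  unfold sentinelWood sentinelWood_alt
  simp only [PySem.List.pyGetD_zero_cons]
  rcases rest with _ | ⟨r1, rest'⟩
  · -- single row: rows = 1
    have hr : PySem.List.pyRange 0 (([g0] : List (List String)).length : Int) 1 = [0] := by
      have := PySem.List.pyRange_one_singleton (a := 0); simpa using this
    rw [hr]
    simp only [List.foldl_cons, List.foldl_nil, PySem.List.pyGetD_zero_cons]
    rw [inner_full g0 g0.length (le_refl _)
        (fun c => ((0:Int) == 0 || (0:Int) == (([g0] : List (List String)).length : Int) - 1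
          || c == 0 || c == ((g0.length : Int)) - 1))
        (by intro c _ _; simp) 0]
    simp
  · -- at least two rows
    set grid : List (List String) := g0 :: r1 :: rest' with hgrid
    have hgne : grid ≠ [] := by simp [hgrid]
    have hrowsN : grid.length = rest'.length + 2 := by simp [hgrid]
    set R : Int := (grid.length : Int) with hR
    have hR2 : (2:Int) ≤ R := by simp [hR, hrowsN]
    set n : Nat := g0.length with hn
    -- the last row
    have hlast : PySem.List.pyGetD grid (R - 1) [] = grid.getLast hgne := by
      have h0 : (0:Int) ≤ R - 1 := by omega
      have h1 : R - 1 < (grid.length : Int) := by rw [← hR]; omega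
      rw [PySem.List.pyGetD_eq_getElem grid [] h0 h1]
      rw [List.getLast_eq_getElem]
      congr 1
      omega
    have hlastneg : PySem.List.pyGetD grid (-1) [] = grid.getLast hgne :=
      PySem.List.pyGetD_neg_one grid [] hgne
    have hlastlen : n ≤ (grid.getLast hgne).length :=
      hlen0 _ (List.getLast_mem hgne)
    -- split the outer range
    have hsplit : PySem.List.pyRange 0 R 1 = 0 :: (PySem.List.pyRange 1 (R - 1) 1 ++ [R - 1]) := by
      rw [PySem.List.pyRange_one_cons (by omega)]
      congr 1
      rw [show R = (R - 1) + 1 by omega, PySem.List.pyRange_one_succ_right (by omega)]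
      norm_num
    rw [hsplit, List.foldl_cons, List.foldl_append]
    -- first row
    rw [show PySem.List.pyGetD grid 0 [] = g0 by simp [hgrid, PySem.List.pyGetD_zero_cons]]
    rw [inner_full g0 n (le_refl _)
        (fun c => ((0:Int) == 0 || (0:Int) == R - 1 || c == 0 || c == ((n:Int)) - 1))
        (by intro c _ _; simp) 0]
    -- middle rows of A: each contributes edgeCnt
    have hmid : ∀ (init : Int),
        (PySem.List.pyRange 1 (R - 1) 1).foldl
          (fun count r =>
            (PySem.List.pyRange 0 ((n:Int)) 1).foldl
              (fun count c =>
                if PySem.List.pyGetD (PySem.List.pyGetD grid r []) c "" == "forest" then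
                  (if r == 0 || r == R - 1 || c == 0 || c == ((n:Int)) - 1 then count + 1 else count)
                else count) count) init
        = init + (((r1 :: rest').dropLast).map (edgeCnt n)).sum := by
      intro init
      rw [PySem.List.foldl_congr_mem _ _
          (fun count r => count + edgeCnt n (PySem.List.pyGetD grid r [])) init ?_]
      · rw [PySem.List.foldl_add]
        congr 1
        have hb : R - 1 = (grid.dropLast.length : Int) := by
          simp only [List.length_dropLast, hR]
          omega
        have hmapc : ∀ r ∈ PySem.List.pyRange 1 (R - 1) 1,
            PySem.List.pyGetD grid r [] = PySem.List.pyGetD grid.dropLast r [] := by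
          intro r hr
          rw [PySem.List.mem_pyRange_one] at hr
          rw [PySem.List.pyGetD_eq_getElem grid [] (by omega) (by rw [← hR]; omega),
              PySem.List.pyGetD_eq_getElem grid.dropLast [] (by omega) (by rw [← hb]; omega)]
          rw [List.getElem_dropLast]
        have hcomp := congrArg (List.map (edgeCnt n))
          (PySem.List.map_pyGetD_pyRange' grid.dropLast ([] : List String) (a := 1) (by omega))
        rw [List.map_map] at hcomp
        simp only [Function.comp_def] at hcomp
        rw [hb]
        calc ((PySem.List.pyRange 1 ((grid.dropLast.length : Int)) 1).map
                (fun r => edgeCnt n (PySem.List.pyGetD grid r []))).sum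
            = ((PySem.List.pyRange 1 ((grid.dropLast.length : Int)) 1).map
                (fun r => edgeCnt n (PySem.List.pyGetD grid.dropLast r []))).sum := by
              rw [← hb]
              exact congrArg List.sum (by
                apply List.map_congr_left
                intro r hr
                congr 1
                exact hmapc r hr)
          _ = ((grid.dropLast.drop (1:Int).toNat).map (edgeCnt n)).sum := by rw [hcomp]
          _ = (((r1 :: rest').dropLast).map (edgeCnt n)).sum := by
              have hdrop : grid.dropLast.drop (1:Int).toNat = (r1 :: rest').dropLast := by
                simp [hgrid]
              rw [hdrop]
      · intro acc r hr
        rw [PySem.List.mem_pyRange_one] at hr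
        exact inner_edge (PySem.List.pyGetD grid r []) n
          (fun c => (r == 0 || r == R - 1 || c == 0 || c == ((n:Int)) - 1))
          (by
            intro c _ _
            have h1 : (r == (0:Int)) = false := by simp; omega
            have h2 : (r == R - 1) = false := by simp; omega
            simp [h1, h2]) acc
    rw [hmid]
    -- last row of A
    simp only [List.foldl_cons, List.foldl_nil]
    rw [hlast]
    rw [inner_full (grid.getLast hgne) n hlastlen
        (fun c => ((R - 1) == 0 || (R - 1) == R - 1 || c == 0 || c == ((n:Int)) - 1))
        (by intro c _ _; simp) _]
    -- B side
    rw [if_pos (by omega : (1:Int) < R)]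
    rw [hlastneg, PySem.List.slice_to _ (by omega : (0:Int) ≤ (n:Int)),
        slice_one_neg_one]
    have htail : grid.tail.dropLast = (r1 :: rest').dropLast := by simp [hgrid]
    rw [htail]
    have hBfold : ∀ (init : Int),
        ((r1 :: rest').dropLast).foldl
          (fun count row =>
            if 1 < ((n:Int)) ∧ PySem.List.pyGetD row ((n:Int) - 1) "" == "forest" then
              (if 0 < ((n:Int)) ∧ PySem.List.pyGetD row 0 "" == "forest" then count + 1 else count) + 1
            else (if 0 < ((n:Int)) ∧ PySem.List.pyGetD row 0 "" == "forest" then count + 1 else count))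
          init
        = init + (((r1 :: rest').dropLast).map (edgeCnt n)).sum := by
      intro init
      rw [PySem.List.foldl_congr_mem _ _ (fun count row => count + edgeCnt n row) init ?_]
      · rw [PySem.List.foldl_add]
      · intro acc row _
        exact bstep_edge n row acc
    rw [hBfold]
    simp only [Int.toNat_natCast, hn, List.take_length]
    ring
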